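-- pv_equiv track=rewrite | github.com/taniajasmin/Basketball-Video-Analysis-Scouting-Report | scouting_report.py | suggest_color
-- ===== SOURCE A (Python) =====
-- SIMILAR_COLORS = {
--     'blue': ['navy'],
--     'green': []
-- }
--
-- def suggest_color(invalid_color):
--     """Suggest valid colors based on invalid input."""
--     invalid_color = invalid_color.lower()
--     for valid_color, similar in SIMILAR_COLORS.items():
--         if invalid_color in similar or invalid_color == valid_color:
--             return valid_color
--     if invalid_color in ['gold', 'golden']:
--         return 'yellow'
--     if invalid_color in ['silver', 'metallic']:
--         return 'gray'
--     if invalid_color in ['cyan', 'turquoise']: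
--         return 'blue'
--     return None
-- ===== SOURCE B (Python) =====
-- _COLOR_MAP = {
--     'blue': 'blue', 'navy': 'blue',
--     'green': 'green',
--     'gold': 'yellow', 'golden': 'yellow',
--     'silver': 'gray', 'metallic': 'gray',
--     'cyan': 'blue', 'turquoise': 'blue',
-- }
--
-- def suggest_color(invalid_color):
--     """Suggest valid colors based on invalid input."""
--     return _COLOR_MAP.get(invalid_color.lower())
-- ===== Notes on version B (the rewrite author's own statement) =====
-- stated objective: simpler
-- what changed: The loop over SIMILAR_COLORS plus the three if-in-list chains are replaced by one precomputed flat dict mapping every recognized name to its suggestion, so the body is a single .get lookup.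
import Mathlib
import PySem

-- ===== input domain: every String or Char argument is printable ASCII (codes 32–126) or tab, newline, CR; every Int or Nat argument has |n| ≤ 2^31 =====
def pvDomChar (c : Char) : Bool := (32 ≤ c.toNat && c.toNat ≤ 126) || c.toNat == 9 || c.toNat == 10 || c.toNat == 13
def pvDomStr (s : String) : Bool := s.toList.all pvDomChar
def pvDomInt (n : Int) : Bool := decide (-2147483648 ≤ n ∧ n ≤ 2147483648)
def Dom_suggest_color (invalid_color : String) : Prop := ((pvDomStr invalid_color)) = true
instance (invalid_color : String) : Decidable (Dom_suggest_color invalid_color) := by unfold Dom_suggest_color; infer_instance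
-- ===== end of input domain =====

-- ===== PORT A =====
-- loop over SIMILAR_COLORS.items(): return valid_color on the first match
def suggestLoop (t : String) : List (String × List String) → Option String
  | [] => none
  | (valid_color, similar) :: rest =>
      if t ∈ similar || t == valid_color then some valid_color
      else suggestLoop t rest

def SIMILAR_COLORS : List (String × List String) := [("blue", ["navy"]), ("green", [])]

def suggest_color (invalid_color : String) : Option String :=
  let t := PySem.Str.lower invalid_color
  match suggestLoop t SIMILAR_COLORS with
  | some c => some c
  | none =>
    if t ∈ ["gold", "golden"] then some "yellow"
    else if t ∈ ["silver", "metallic"] then some "gray"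
    else if t ∈ ["cyan", "turquoise"] then some "blue"
    else none

-- ===== PORT B =====
def COLOR_MAP : PySem.Dict String String :=
  PySem.Dict.ofList [("blue", "blue"), ("navy", "blue"), ("green", "green"),
   ("gold", "yellow"), ("golden", "yellow"),
   ("silver", "gray"), ("metallic", "gray"),
   ("cyan", "blue"), ("turquoise", "blue")]


def suggest_color_alt (invalid_color : String) : Option String :=
  PySem.Dict.get? COLOR_MAP (PySem.Str.lower invalid_color)

-- ===== PRECONDITION & SPEC =====
def Spec_suggest_color (invalid_color : String) (out : Option String) : Prop := out = suggest_color_alt invalid_color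
instance (invalid_color : String) (out : Option String) : Decidable (Spec_suggest_color invalid_color out) := by unfold Spec_suggest_color; infer_instance

-- ===== CLAIM (what is proved, stated in full; the proofs are below) =====
def Claim_equal_suggest_color : Prop := ∀ (invalid_color : String), Dom_suggest_color invalid_color → Spec_suggest_color invalid_color (suggest_color invalid_color)

-- ===== LEMMAS AND PROOFS =====

-- ===== VERDICT (by name: the statement is the Claim_ definition above) =====
lemma color_map_mk : COLOR_MAP = PySem.Dict.mk
    [("blue", "blue"), ("navy", "blue"), ("green", "green"),
     ("gold", "yellow"), ("golden", "yellow"),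
     ("silver", "gray"), ("metallic", "gray"),
     ("cyan", "blue"), ("turquoise", "blue")] := by decide

theorem suggest_color_spec : Claim_equal_suggest_color := by
  intro s _
  unfold Spec_suggest_color suggest_color suggest_color_alt
  generalize PySem.Str.lower s = t
  rw [color_map_mk]
  by_cases h1 : t = "blue" <;> by_cases h2 : t = "navy" <;> by_cases h3 : t = "green" <;>
    by_cases h4 : t = "gold" <;> by_cases h5 : t = "golden" <;> by_cases h6 : t = "silver" <;>
    by_cases h7 : t = "metallic" <;> by_cases h8 : t = "cyan" <;> by_cases h9 : t = "turquoise" <;>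
    simp_all [suggestLoop, SIMILAR_COLORS, PySem.Dict.get?]
  exact ⟨Ne.symm h1, Ne.symm h2, Ne.symm h3, Ne.symm h4, Ne.symm h5,
    Ne.symm h6, Ne.symm h7, Ne.symm h8, Ne.symm h9⟩
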